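-- pv_equiv track=rewrite | github.com/martineberlein/avicenna | src/avicenna/execution/helpers.py | read_escaped_token
-- ===== SOURCE A (Python) =====
-- def read_escaped_token(line, pos):
--     mode = "NORMAL"
--     cp = pos + 1
--     while cp < len(line):
--         if line[cp] == "'" and "NORMAL" == mode:
--             return line[pos : cp + 1], cp + 1
--         elif mode == "ESCAPED":
--             mode = "NORMAL"
--         elif line[cp] == "\\" and "NORMAL" == mode:
--             mode = "ESCAPED"
--         cp = cp + 1
--     raise AssertionError("Missing closing quotation.")
-- ===== SOURCE B (Python) =====
-- def read_escaped_token(line, pos):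
--     n = len(line)
--     cp = pos + 1
--     while cp < n:
--         if line[cp] != "'":
--             cp += 1
--             continue
--         # quote found: walk backwards over the backslash run just before it
--         k = cp - 1
--         while k >= pos + 1 and line[k] == "\\":
--             k -= 1
--         if (cp - 1 - k) % 2 == 0:  # even run => the quote is not escaped
--             return line[pos:cp + 1], cp + 1
--         cp += 1
--     raise AssertionError("Missing closing quotation.")
-- ===== Notes on version B (the rewrite author's own statement) =====
-- stated objective: alternative
-- what changed: Replaces A's forward NORMAL/ESCAPED state machine with a quote-search loop that carries no escape state: at each quote it scans backwards over the backslash run immediately before it and accepts the quote iff that run has even length.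
import Mathlib
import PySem

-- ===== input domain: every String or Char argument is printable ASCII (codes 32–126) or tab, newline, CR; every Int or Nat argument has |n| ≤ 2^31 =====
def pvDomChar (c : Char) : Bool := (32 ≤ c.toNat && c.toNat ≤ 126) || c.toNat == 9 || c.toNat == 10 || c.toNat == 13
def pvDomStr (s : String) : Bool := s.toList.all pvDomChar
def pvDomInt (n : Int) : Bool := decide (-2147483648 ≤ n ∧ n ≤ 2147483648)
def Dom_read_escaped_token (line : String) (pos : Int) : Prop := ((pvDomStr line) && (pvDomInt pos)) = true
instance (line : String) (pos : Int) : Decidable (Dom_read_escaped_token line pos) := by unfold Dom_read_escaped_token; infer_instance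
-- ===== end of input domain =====

-- B replaces A's forward NORMAL/ESCAPED state machine by a stateless quote search that,
-- at each quote, checks the parity of the backslash run just before it by a backward
-- scan (objective: alternative). Equivalence is about the return value; on inputs
-- excluded by Pre_ the Python A raises.

-- ===== PORT A =====
-- while loop with mode variable; the AssertionError branch is the junk value ("", 0),
-- excluded by Pre_read_escaped_token.
def readA_go (s : List Char) (pos : Int) (cp : Int) (mode : Bool) : String × Int :=
  if _h : cp < (s.length : Int) then
    match PySem.List.pyGet? s cp with
    | none => ("", 0)  -- Python raises IndexError here (cp < -len); outside Pre_
    | some c =>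
      if c = '\'' ∧ mode = false then
        (String.ofList (PySem.List.slice s (some pos) (some (cp + 1))), cp + 1)
      else if mode = true then readA_go s pos (cp + 1) false
      else if c = '\\' then readA_go s pos (cp + 1) true
      else readA_go s pos (cp + 1) false
  else ("", 0)  -- Python raises AssertionError here; outside Pre_
termination_by (((s.length : Int)) - cp).toNat
decreasing_by all_goals omega

def read_escaped_token (line : String) (pos : Int) : String × Int :=
  readA_go line.toList pos (pos + 1) false

-- ===== PORT B =====
-- inner backward loop: 'k = cp-1; while k >= pos+1 and line[k] == "\\": k -= 1'; returns k
def readB_back (s : List Char) (pos : Int) (k : Int) : Int :=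
  if _h : pos + 1 ≤ k then
    match PySem.List.pyGet? s k with
    | none => k  -- Python raises IndexError here; unreachable under Pre_ (k ≥ pos+1 ≥ -len)
    | some c => if c = '\\' then readB_back s pos (k - 1) else k
  else k
termination_by (k - pos).toNat
decreasing_by all_goals omega

-- outer loop: search for the next quote, accept it iff its backslash run is even
def readB_go (s : List Char) (pos : Int) (cp : Int) : String × Int :=
  if _h : cp < (s.length : Int) then
    match PySem.List.pyGet? s cp with
    | none => ("", 0)  -- Python raises IndexError here; outside Pre_
    | some c =>
      if c ≠ '\'' then readB_go s pos (cp + 1)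
      else
        let k := readB_back s pos (cp - 1)
        if PySem.Int.mod (cp - 1 - k) 2 = 0 then
          (String.ofList (PySem.List.slice s (some pos) (some (cp + 1))), cp + 1)
        else readB_go s pos (cp + 1)
  else ("", 0)  -- Python raises AssertionError here; outside Pre_
termination_by (((s.length : Int)) - cp).toNat
decreasing_by all_goals omega

def read_escaped_token_alt (line : String) (pos : Int) : String × Int :=
  readB_go line.toList pos (pos + 1)

-- ===== PRECONDITION & SPEC =====
-- Pre_ is exactly the inputs on which A returns normally: the scan must start in
-- range (Python raises IndexError when pos+1 < -len) and the scanned character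
-- sequence (the suffix from pos+1, preceded — for negative pos — by the wrapped
-- tail) must contain an un-escaped quote, i.e. a quote preceded by an even-length
-- run of backslashes; otherwise A raises AssertionError.
def pvScanSeq (s : List Char) (pos : Int) : List Char :=
  if pos + 1 < 0 then s.drop (s.length + pos + 1).toNat ++ s else s.drop (pos + 1).toNat

def Pre_read_escaped_token (line : String) (pos : Int) : Prop :=
  -((line.toList.length : Int)) ≤ pos + 1 ∧
  ∃ k < (pvScanSeq line.toList pos).length,
    (pvScanSeq line.toList pos)[k]! = '\'' ∧
    (((pvScanSeq line.toList pos).take k).reverse.takeWhile (fun c => c = '\\')).length % 2 = 0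
instance (line : String) (pos : Int) : Decidable (Pre_read_escaped_token line pos) := by
  unfold Pre_read_escaped_token; infer_instance

def pvWitness_read_escaped_token : String × Int := ("'ab'", 0)

def Spec_read_escaped_token (line : String) (pos : Int) (out : String × Int) : Prop := out = read_escaped_token_alt line pos
instance (line : String) (pos : Int) (out : String × Int) : Decidable (Spec_read_escaped_token line pos out) := by unfold Spec_read_escaped_token; infer_instance

-- ===== CLAIM (what is proved, stated in full; the proofs are below) =====
def Claim_equal_read_escaped_token : Prop := ∀ (line : String) (pos : Int), Dom_read_escaped_token line pos → Pre_read_escaped_token line pos → Spec_read_escaped_token line pos (read_escaped_token line pos)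

-- ===== LEMMAS AND PROOFS =====

theorem pyGet?_isSome_of_inrange (s : List Char) (i : Int)
    (h1 : -((s.length : Int)) ≤ i) (h2 : i < (s.length : Int)) :
    ∃ c, PySem.List.pyGet? s i = some c := by
  have hin : PySem.Raise.InRange s.length i := by
    unfold PySem.Raise.InRange; omega
  have hne : ¬ (PySem.List.pyGet? s i = none) := by
    rw [PySem.List.pyGet?_eq_none_iff]
    exact not_not_intro hin
  cases hg : PySem.List.pyGet? s i with
  | none => exact absurd hg hne
  | some c => exact ⟨c, rfl⟩

-- bound of the backward scan: it never moves forward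
theorem readB_back_le' (s : List Char) (pos : Int) :
    ∀ (n : Nat) (k : Int), (k - pos).toNat ≤ n → readB_back s pos k ≤ k := by
  intro n
  induction n with
  | zero =>
    intro k hle
    rw [readB_back]
    have : ¬ pos + 1 ≤ k := by omega
    simp [this]
  | succ n ih =>
    intro k hle
    rw [readB_back]
    by_cases h : pos + 1 ≤ k
    · simp only [h, dif_pos]
      cases hg : PySem.List.pyGet? s k with
      | none => simp
      | some c =>
        by_cases hc : c = '\\'
        · have := ih (k - 1) (by omega)
          simp only [hc, if_pos]
          omega
        · simp [hc]
    · simp [h]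

-- parity of the backslash run ending just before cp, as B computes it
def oddRun (s : List Char) (pos : Int) (cp : Int) : Bool :=
  decide (PySem.Int.mod (cp - 1 - readB_back s pos (cp - 1)) 2 ≠ 0)

theorem oddRun_base (s : List Char) (pos : Int) : oddRun s pos (pos + 1) = false := by
  unfold oddRun
  rw [readB_back]
  simp [PySem.Int.mod]

theorem readB_back_nonbs (s : List Char) (pos : Int) (cp : Int) {c : Char}
    (hg : PySem.List.pyGet? s cp = some c) (hc : ¬ c = '\\') :
    readB_back s pos cp = cp := by
  rw [readB_back]
  by_cases h : pos + 1 ≤ cp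
  · simp [h, hg, hc]
  · simp [h]

theorem oddRun_after_nonbs (s : List Char) (pos : Int) (cp : Int) {c : Char}
    (hg : PySem.List.pyGet? s cp = some c) (hc : ¬ c = '\\') :
    oddRun s pos (cp + 1) = false := by
  unfold oddRun
  have := readB_back_nonbs s pos cp hg hc
  simp [show cp + 1 - 1 = cp by omega, this, PySem.Int.mod]

theorem oddRun_after_bs (s : List Char) (pos : Int) (cp : Int)
    (hcp : pos + 1 ≤ cp)
    (hg : PySem.List.pyGet? s cp = some '\\') :
    oddRun s pos (cp + 1) = !(oddRun s pos cp) := by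
  unfold oddRun
  have hstep : readB_back s pos cp = readB_back s pos (cp - 1) := by
    rw [readB_back]; simp [hcp, hg]
  have hle : readB_back s pos (cp - 1) ≤ cp - 1 :=
    readB_back_le' s pos (cp - 1 - pos).toNat (cp - 1) le_rfl
  rw [show cp + 1 - 1 = cp by omega, hstep]
  set r := readB_back s pos (cp - 1) with hr
  rw [PySem.Int.mod_eq_emod_of_pos (a := cp - r) (by omega),
      PySem.Int.mod_eq_emod_of_pos (a := cp - 1 - r) (by omega)]
  by_cases h : (cp - 1 - r) % 2 = 0
  · have h' : ¬ (cp - r) % 2 = 0 := by omega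
    simp [h, h']
  · have h' : (cp - r) % 2 = 0 := by omega
    simp [h, h']

-- main loop correspondence: A at mode = oddRun equals B
theorem go_eq (s : List Char) (pos : Int) (hlb : -((s.length : Int)) ≤ pos + 1) :
    ∀ (n : Nat) (cp : Int), (((s.length : Int)) - cp).toNat ≤ n → pos + 1 ≤ cp →
      readA_go s pos cp (oddRun s pos cp) = readB_go s pos cp := by
  intro n
  induction n with
  | zero =>
    intro cp hle hcp
    have hge : ¬ cp < (s.length : Int) := by omega
    rw [readA_go, readB_go]; simp [hge]
  | succ n ih =>
    intro cp hle hcp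
    by_cases hlt : cp < (s.length : Int)
    · obtain ⟨c, hg⟩ := pyGet?_isSome_of_inrange s cp (by omega) hlt
      rw [readA_go, readB_go]
      simp only [hlt, dif_pos, hg]
      by_cases hq : c = '\''
      · -- a quote: B computes the run parity; A consults its mode
        subst hq
        rcases PySem.Int.mod_two_eq (cp - 1 - readB_back s pos (cp - 1)) with hmod | hmod
        · have hdvd : (2:Int) ∣ (cp - 1 - readB_back s pos (cp - 1)) :=
            (PySem.Int.mod_eq_zero_iff_dvd _ _).mp hmod
          simp [oddRun, hdvd]
        · have hihn := ih (cp + 1) (by omega) (by omega)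
          rw [oddRun_after_nonbs s pos cp hg (by simp)] at hihn
          simp [oddRun, hihn]
      · by_cases hb : c = '\\'
        · -- a backslash: A toggles its mode, B just moves on
          subst hb
          have hrun := oddRun_after_bs s pos cp hcp hg
          have hihn := ih (cp + 1) (by omega) (by omega)
          rw [hrun] at hihn
          cases hm : oddRun s pos cp
          · rw [hm] at hihn
            simp only [Bool.not_false] at hihn
            simp [hihn]
          · rw [hm] at hihn
            simp only [Bool.not_true] at hihn
            simp [hihn]
        · -- ordinary character: both step by one; parity resets to even
          have hihn := ih (cp + 1) (by omega) (by omega)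
          rw [oddRun_after_nonbs s pos cp hg hb] at hihn
          cases hm : oddRun s pos cp
          · simp [hq, hb, hihn]
          · simp [hq, hihn]
    · rw [readA_go, readB_go]; simp [hlt]

-- ===== VERDICT (by name: the statement is the Claim_ definition above) =====
theorem read_escaped_token_spec : Claim_equal_read_escaped_token := by
  intro line pos _hdom hpre
  unfold Spec_read_escaped_token read_escaped_token read_escaped_token_alt
  have hlb := hpre.1
  have := go_eq line.toList pos hlb (((line.toList.length : Int)) - (pos + 1)).toNat (pos + 1) le_rfl le_rfl
  rw [oddRun_base] at this
  exact this
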